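-- pv_equiv track=rewrite | github.com/gana36/cleanFusion | modules/parsers.py | build_three_level_hmd_fixed
-- ===== SOURCE A (Python) =====
-- def build_two_level_hmd_fixed(header_rows):
--     """Build two-level hierarchy with proper column mapping"""
--     if len(header_rows) < 2:
--         return build_single_level_hmd(header_rows[0])
--
--     hmd = []
--     row1, row2 = header_rows[0], header_rows[1]
--
--     for i, cell in enumerate(row2):
--         if cell:
--             grade = cell
--             treatment_for_this_column = None
--             for j in range(i, -1, -1):
--                 if j < len(row1) and row1[j]:
--                     treatment_for_this_column = row1[j]
--                     break
--             if treatment_for_this_column: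
--                 full_path = f"{treatment_for_this_column}.{grade}"
--                 hmd.append(full_path)
--
--     return hmd
--
-- def build_three_level_hmd_fixed(header_rows):
--     """Build three-level hierarchy with proper column mapping"""
--     if len(header_rows) < 3:
--         return build_two_level_hmd_fixed(header_rows[:2])
--
--     hmd = []
--     row1, row2, row3 = header_rows[0], header_rows[1], header_rows[2]
--
--     main_category = None
--     for cell in row1:
--         if cell:
--             main_category = cell
--             break
--     if not main_category:
--         return []
--
--     for i, cell in enumerate(row3):
--         if cell:
--             grade = cell
--             treatment_for_this_column = None
--             for j in range(i, -1, -1):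
--                 if j < len(row2) and row2[j]:
--                     treatment_for_this_column = row2[j]
--                     break
--             if treatment_for_this_column:
--                 full_path = f"{main_category}.{treatment_for_this_column}.{grade}"
--                 hmd.append(full_path)
--
--     return hmd
--
-- def build_single_level_hmd(header_row):
--     """Build simple single-level hierarchy"""
--     hmd = []
--     for cell in header_row:
--         if cell:
--             hmd.append(cell)
--     return hmd
-- ===== SOURCE B (Python) =====
-- def build_three_level_hmd_fixed(header_rows):
--     """Build dotted hierarchy paths; one forward pass tracks the last non-empty
--     treatment cell instead of scanning backwards for every column."""
--     n = len(header_rows)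
--     if n >= 3:
--         row1, row2, row3 = header_rows[0], header_rows[1], header_rows[2]
--         main = next((c for c in row1 if c), None)
--         if main is None:
--             return []
--         out = []
--         last = None
--         for i, cell in enumerate(row3):
--             if i < len(row2) and row2[i]:
--                 last = row2[i]
--             if cell and last:
--                 out.append(f"{main}.{last}.{cell}")
--         return out
--     if n == 2:
--         row1, row2 = header_rows[0], header_rows[1]
--         out = []
--         last = None
--         for i, cell in enumerate(row2):
--             if i < len(row1) and row1[i]:
--                 last = row1[i]
--             if cell and last:
--                 out.append(f"{last}.{cell}")
--         return out
--     return [c for c in header_rows[0] if c]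
-- ===== Notes on version B (the rewrite author's own statement) =====
-- stated objective: alternative
-- what changed: Replaces A's per-column backward scan for the nearest non-empty treatment cell with a single forward pass that tracks the last non-empty treatment value seen so far.
import Mathlib
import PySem

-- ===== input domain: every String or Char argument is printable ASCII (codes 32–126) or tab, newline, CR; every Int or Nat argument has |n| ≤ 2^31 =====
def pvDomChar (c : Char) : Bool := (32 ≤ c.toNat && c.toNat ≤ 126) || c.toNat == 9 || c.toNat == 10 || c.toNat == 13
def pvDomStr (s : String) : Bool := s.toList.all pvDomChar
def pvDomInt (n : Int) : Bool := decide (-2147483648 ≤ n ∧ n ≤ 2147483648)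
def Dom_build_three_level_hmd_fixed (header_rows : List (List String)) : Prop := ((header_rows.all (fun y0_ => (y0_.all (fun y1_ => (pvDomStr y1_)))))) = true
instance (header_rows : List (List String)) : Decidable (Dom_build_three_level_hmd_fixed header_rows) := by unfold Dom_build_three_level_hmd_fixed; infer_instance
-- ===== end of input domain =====

-- B replaces A's per-column backward scan with a single forward pass that tracks the
-- last non-empty treatment cell seen so far. Return value only.

-- ===== PORT A =====
-- the `for cell in row1: if cell: break` loop finding the main category
def pvFirstNonEmpty : List String → Option String
  | [] => none
  | c :: rest => if c ≠ "" then some c else pvFirstNonEmpty rest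

-- A's inner loop `for j in range(i, -1, -1): if j < len(row) and row[j]: break`:
-- row.getD j "" ≠ "" is exactly `j < len(row) and row[j]` (out of range gives "", falsy)
def pvFindBack (row : List String) : Nat → Option String
  | 0 => if row.getD 0 "" ≠ "" then some (row.getD 0 "") else none
  | j + 1 => if row.getD (j+1) "" ≠ "" then some (row.getD (j+1) "") else pvFindBack row j

-- A's main loop over enumerate(row3), accumulating hmd
def pvLoop3A (row2 : List String) (mc : String) : Nat → List String → List String → List String
  | _, [], hmd => hmd
  | i, cell :: rest, hmd =>
    if cell ≠ "" then
      match pvFindBack row2 i with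
      | some t => pvLoop3A row2 mc (i+1) rest (hmd ++ [mc ++ "." ++ t ++ "." ++ cell])
      | none => pvLoop3A row2 mc (i+1) rest hmd
    else pvLoop3A row2 mc (i+1) rest hmd

-- two-level variant's loop over enumerate(row2)
def pvLoop2A (row1 : List String) : Nat → List String → List String → List String
  | _, [], hmd => hmd
  | i, cell :: rest, hmd =>
    if cell ≠ "" then
      match pvFindBack row1 i with
      | some t => pvLoop2A row1 (i+1) rest (hmd ++ [t ++ "." ++ cell])
      | none => pvLoop2A row1 (i+1) rest hmd
    else pvLoop2A row1 (i+1) rest hmd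

def build_single_level_hmd (header_row : List String) : List String :=
  header_row.foldl (fun hmd c => if c ≠ "" then hmd ++ [c] else hmd) []

def build_two_level_hmd_fixed (header_rows : List (List String)) : List String :=
  if header_rows.length < 2 then build_single_level_hmd (header_rows.getD 0 [])
  else pvLoop2A (header_rows.getD 0 []) 0 (header_rows.getD 1 []) []

def build_three_level_hmd_fixed (header_rows : List (List String)) : List String :=
  if header_rows.length < 3 then build_two_level_hmd_fixed (header_rows.take 2)
  else
    match pvFirstNonEmpty (header_rows.getD 0 []) with
    | none => []
    | some mc => pvLoop3A (header_rows.getD 1 []) mc 0 (header_rows.getD 2 []) []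

-- ===== PORT B =====
-- forward pass carrying `last`, the last non-empty treatment cell seen so far
def pvLoop3B (row2 : List String) (mc : String) : Nat → Option String → List String → List String → List String
  | _, _, [], out => out
  | i, last, cell :: rest, out =>
    let last' := if row2.getD i "" ≠ "" then some (row2.getD i "") else last
    let out' := if cell ≠ "" then
        match last' with
        | some t => out ++ [mc ++ "." ++ t ++ "." ++ cell]
        | none => out
      else out
    pvLoop3B row2 mc (i+1) last' rest out'

def pvLoop2B (row1 : List String) : Nat → Option String → List String → List String → List String
  | _, _, [], out => out
  | i, last, cell :: rest, out =>
    let last' := if row1.getD i "" ≠ "" then some (row1.getD i "") else last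
    let out' := if cell ≠ "" then
        match last' with
        | some t => out ++ [t ++ "." ++ cell]
        | none => out
      else out
    pvLoop2B row1 (i+1) last' rest out'

def build_three_level_hmd_fixed_alt (header_rows : List (List String)) : List String :=
  if 3 ≤ header_rows.length then
    match pvFirstNonEmpty (header_rows.getD 0 []) with
    | none => []
    | some mc => pvLoop3B (header_rows.getD 1 []) mc 0 none (header_rows.getD 2 []) []
  else if header_rows.length = 2 then
    pvLoop2B (header_rows.getD 0 []) 0 none (header_rows.getD 1 []) []
  else (header_rows.getD 0 []).filter (fun c => c ≠ "")

-- ===== PRECONDITION & SPEC =====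
-- Pre_ excludes only the empty list, on which A raises IndexError (header_rows[0]).
def Pre_build_three_level_hmd_fixed (header_rows : List (List String)) : Prop := header_rows ≠ []
instance (header_rows : List (List String)) : Decidable (Pre_build_three_level_hmd_fixed header_rows) := by unfold Pre_build_three_level_hmd_fixed; infer_instance

def pvWitness_build_three_level_hmd_fixed : List (List String) := [["A"], ["x", "", "y"], ["1", "2", "3"]]

def Spec_build_three_level_hmd_fixed (header_rows : List (List String)) (out : List String) : Prop := out = build_three_level_hmd_fixed_alt header_rows
instance (header_rows : List (List String)) (out : List String) : Decidable (Spec_build_three_level_hmd_fixed header_rows out) := by unfold Spec_build_three_level_hmd_fixed; infer_instance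

-- ===== CLAIM (what is proved, stated in full; the proofs are below) =====
def Claim_equal_build_three_level_hmd_fixed : Prop := ∀ (header_rows : List (List String)), Dom_build_three_level_hmd_fixed header_rows → Pre_build_three_level_hmd_fixed header_rows → Spec_build_three_level_hmd_fixed header_rows (build_three_level_hmd_fixed header_rows)

-- ===== LEMMAS AND PROOFS =====

-- the `last` value B carries when it reaches index i
def pvPrev (row : List String) : Nat → Option String
  | 0 => none
  | j + 1 => pvFindBack row j

lemma pvPrev_step (row : List String) (i : Nat) :
    (if row.getD i "" ≠ "" then some (row.getD i "") else pvPrev row i) = pvFindBack row i := by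
  cases i <;> simp [pvPrev, pvFindBack]

lemma loop3_eq (row2 : List String) (mc : String) :
    ∀ (rest : List String) (i : Nat) (hmd : List String),
      pvLoop3B row2 mc i (pvPrev row2 i) rest hmd = pvLoop3A row2 mc i rest hmd := by
  intro rest
  induction rest with
  | nil => intro i hmd; rfl
  | cons cell rest ih =>
    intro i hmd
    show pvLoop3B row2 mc (i+1) _ rest _ = _
    rw [pvPrev_step]
    have ih' : ∀ h, pvLoop3B row2 mc (i+1) (pvFindBack row2 i) rest h = pvLoop3A row2 mc (i+1) rest h :=
      fun h => ih (i+1) h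
    rw [ih']
    simp only [pvLoop3A]
    cases hfb : pvFindBack row2 i <;> by_cases hc : cell ≠ "" <;> simp [*]

lemma loop2_eq (row1 : List String) :
    ∀ (rest : List String) (i : Nat) (hmd : List String),
      pvLoop2B row1 i (pvPrev row1 i) rest hmd = pvLoop2A row1 i rest hmd := by
  intro rest
  induction rest with
  | nil => intro i hmd; rfl
  | cons cell rest ih =>
    intro i hmd
    show pvLoop2B row1 (i+1) _ rest _ = _
    rw [pvPrev_step]
    have ih' : ∀ h, pvLoop2B row1 (i+1) (pvFindBack row1 i) rest h = pvLoop2A row1 (i+1) rest h :=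
      fun h => ih (i+1) h
    rw [ih']
    simp only [pvLoop2A]
    cases hfb : pvFindBack row1 i <;> by_cases hc : cell ≠ "" <;> simp [*]

lemma single_eq_filter (row : List String) :
    build_single_level_hmd row = row.filter (fun c => c ≠ "") := by
  unfold build_single_level_hmd
  have h := PySem.List.foldl_append_if (p := fun c : String => decide (c ≠ "")) (f := fun c => c)
    (acc := ([] : List String)) (l := row)
  simp only [decide_eq_true_eq] at h
  simpa using h

-- ===== VERDICT (by name: the statement is the Claim_ definition above) =====
theorem build_three_level_hmd_fixed_spec : Claim_equal_build_three_level_hmd_fixed := by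
  intro header_rows _ hpre
  unfold Spec_build_three_level_hmd_fixed
  match header_rows with
  | [] => exact absurd rfl hpre
  | [r1] =>
    simp [build_three_level_hmd_fixed, build_three_level_hmd_fixed_alt,
      build_two_level_hmd_fixed, single_eq_filter]
  | [r1, r2] =>
    have := loop2_eq r1 r2 0 []
    simp [build_three_level_hmd_fixed, build_three_level_hmd_fixed_alt,
      build_two_level_hmd_fixed, pvPrev] at this ⊢
    exact this.symm
  | r1 :: r2 :: r3 :: rest =>
    have h3 : ¬ (r1 :: r2 :: r3 :: rest).length < 3 := by simp
    have h3' : 3 ≤ (r1 :: r2 :: r3 :: rest).length := by simp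
    simp only [build_three_level_hmd_fixed, build_three_level_hmd_fixed_alt, if_neg h3, if_pos h3']
    cases pvFirstNonEmpty ((r1 :: r2 :: r3 :: rest).getD 0 []) with
    | none => rfl
    | some mc =>
      have := loop3_eq ((r1 :: r2 :: r3 :: rest).getD 1 []) mc ((r1 :: r2 :: r3 :: rest).getD 2 []) 0 []
      simp [pvPrev] at this ⊢
      exact this.symm
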